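-- pv_equiv track=rewrite | github.com/elizzer/MLT-MINI-PRO | models/span/v1/dataset.py | annotate_sentence
-- ===== SOURCE A (Python) =====
-- def annotate_sentence(sentence, indices):
--     # Sort the indices to handle unordered cases
--     indices.sort()
--
--     # Initialize a list to store the annotated tuples
--     annotated_tuples = []
--
--     current_index = 0
--
--     for start, end in indices:
--         # Add 'o' annotations for words between the current_index and start
--         words_between = sentence[current_index:start].split()
--         annotated_tuples.extend((word, 'o') for word in words_between if word)
--
--         # Add 's' annotations for words between start and end
--         words_within = sentence[start:end + 1].split()
--         annotated_tuples.extend((word, 's') for word in words_within if word)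
--
--         current_index = end + 1
--
--     # Add 'o' annotations for words after the last end index
--     remaining_words = sentence[current_index:].split()
--     annotated_tuples.extend((word, 'o') for word in remaining_words if word)
--
--     return annotated_tuples
-- ===== SOURCE B (Python) =====
-- def annotate_sentence(sentence, indices):
--     # Same in-place sort as the original (mutation of `indices` is preserved).
--     indices.sort()
--     return _annotate(sentence, indices, 0)
--
--
-- def _annotate(sentence, spans, cur):
--     # Recursive decomposition: annotate the first span's region, then recurse
--     # on the remaining spans; the result is assembled by pure concatenation
--     # (no mutable accumulator, no cursor variable threaded through a loop).
--     if not spans: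
--         return [(w, 'o') for w in sentence[cur:].split()]
--     (start, end), rest = spans[0], spans[1:]
--     return ([(w, 'o') for w in sentence[cur:start].split()]
--             + [(w, 's') for w in sentence[start:end + 1].split()]
--             + _annotate(sentence, rest, end + 1))
-- ===== Notes on version B (the rewrite author's own statement) =====
-- stated objective: alternative
-- what changed: B replaces A's imperative cursor loop with mutable extend/accumulator state by a pure recursion over the sorted span list that assembles the answer by concatenation (and drops the always-true 'if word' filter); the cut arithmetic is the behaviourally-required one.
import Mathlib
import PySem

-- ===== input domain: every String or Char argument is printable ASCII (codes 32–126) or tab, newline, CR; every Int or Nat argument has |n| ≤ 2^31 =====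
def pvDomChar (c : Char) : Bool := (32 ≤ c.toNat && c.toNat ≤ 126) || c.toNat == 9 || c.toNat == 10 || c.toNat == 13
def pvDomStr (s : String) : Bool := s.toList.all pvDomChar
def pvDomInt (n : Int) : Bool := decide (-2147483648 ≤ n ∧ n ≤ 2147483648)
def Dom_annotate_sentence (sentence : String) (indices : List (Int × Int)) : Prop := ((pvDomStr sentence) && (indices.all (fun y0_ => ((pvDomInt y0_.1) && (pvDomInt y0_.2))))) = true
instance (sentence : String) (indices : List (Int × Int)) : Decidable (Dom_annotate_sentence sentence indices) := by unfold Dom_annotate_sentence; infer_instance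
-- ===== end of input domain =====

-- B replaces A's imperative cursor loop (mutable result list, extend, threaded cursor) by a
-- pure recursion over the sorted span list assembling the answer by concatenation; same cost.
-- Both Pythons sort `indices` in place; the theorems are about the return value only.

-- ===== PORT A =====
def annotate_sentence (sentence : String) (indices : List (Int × Int)) : List (String × String) :=
  let sortedIdx := PySem.List.sorted2 indices Prod.fst Prod.snd
  let r := sortedIdx.foldl (fun (st : List (String × String) × Int) se =>
    let wordsBetween := PySem.Str.split₀ (PySem.Str.slice sentence (some st.2) (some se.1))
    let acc1 := st.1 ++ ((wordsBetween.filter (fun w => w != "")).map (fun w => (w, "o")))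
    let wordsWithin := PySem.Str.split₀ (PySem.Str.slice sentence (some se.1) (some (se.2 + 1)))
    let acc2 := acc1 ++ ((wordsWithin.filter (fun w => w != "")).map (fun w => (w, "s")))
    (acc2, se.2 + 1)) ([], 0)
  r.1 ++ (((PySem.Str.split₀ (PySem.Str.slice sentence (some r.2) none)).filter (fun w => w != "")).map (fun w => (w, "o")))

-- ===== PORT B =====
-- helper `_annotate` of Source B: pure structural recursion on the span list
def annotateGo (sentence : String) : List (Int × Int) → Int → List (String × String)
  | [], cur => (PySem.Str.split₀ (PySem.Str.slice sentence (some cur) none)).map (fun w => (w, "o"))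
  | (start, e) :: rest, cur =>
      ((PySem.Str.split₀ (PySem.Str.slice sentence (some cur) (some start))).map (fun w => (w, "o")))
      ++ ((PySem.Str.split₀ (PySem.Str.slice sentence (some start) (some (e + 1)))).map (fun w => (w, "s")))
      ++ annotateGo sentence rest (e + 1)

def annotate_sentence_alt (sentence : String) (indices : List (Int × Int)) : List (String × String) :=
  annotateGo sentence (PySem.List.sorted2 indices Prod.fst Prod.snd) 0

-- ===== PRECONDITION & SPEC =====
def Spec_annotate_sentence (sentence : String) (indices : List (Int × Int)) (out : List (String × String)) : Prop := out = annotate_sentence_alt sentence indices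
instance (sentence : String) (indices : List (Int × Int)) (out : List (String × String)) : Decidable (Spec_annotate_sentence sentence indices out) := by unfold Spec_annotate_sentence; infer_instance

-- ===== CLAIM (what is proved, stated in full; the proofs are below) =====
def Claim_equal_annotate_sentence : Prop := ∀ (sentence : String) (indices : List (Int × Int)), Dom_annotate_sentence sentence indices → Spec_annotate_sentence sentence indices (annotate_sentence sentence indices)

-- ===== LEMMAS AND PROOFS =====

-- split₀ never yields an empty piece, so A's `if word` filter is the identity.
theorem chars_split₀_go_ne_nil (s cur : List Char) (acc : List (List Char))
    (h : ∀ x ∈ acc, x ≠ []) :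
    ∀ x ∈ PySem.Chars.split₀.go s cur acc, x ≠ [] := by
  induction s generalizing cur acc with
  | nil =>
    intro x hx
    unfold PySem.Chars.split₀.go at hx
    split at hx
    · exact h x (List.mem_reverse.mp hx)
    · next heq =>
      simp only [List.isEmpty_iff] at heq
      rcases List.mem_cons.mp (List.mem_reverse.mp hx) with h1 | h2
      · simpa [h1] using (List.reverse_eq_nil_iff).not.mpr heq
      · exact h x h2
  | cons c rest ih =>
    intro x hx
    unfold PySem.Chars.split₀.go at hx
    split at hx
    · split at hx
      · exact ih [] acc h x hx
      · next heq =>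
        refine ih [] (cur.reverse :: acc) ?_ x hx
        intro y hy
        simp only [List.isEmpty_iff] at heq
        rcases List.mem_cons.mp hy with h1 | h2
        · simpa [h1] using (List.reverse_eq_nil_iff).not.mpr heq
        · exact h y h2
    · exact ih (c :: cur) acc h x hx

theorem str_split₀_ne_empty (s : String) : ∀ w ∈ PySem.Str.split₀ s, w ≠ "" := by
  intro w hw hcontra
  have : w.toList ∈ PySem.Chars.split₀ s.toList := by
    rw [← PySem.Str.split₀_map_toList]
    exact List.mem_map_of_mem hw
  have hne := chars_split₀_go_ne_nil s.toList [] [] (by simp) w.toList this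
  apply hne
  simp [hcontra]

theorem filter_split₀ (s : String) :
    (PySem.Str.split₀ s).filter (fun w => w != "") = PySem.Str.split₀ s := by
  apply List.filter_eq_self.mpr
  intro w hw
  simpa using str_split₀_ne_empty s w hw

-- A's loop body, named (proof-side only).
def stepA (sentence : String) (st : List (String × String) × Int) (se : Int × Int) :
    List (String × String) × Int :=
  let wordsBetween := PySem.Str.split₀ (PySem.Str.slice sentence (some st.2) (some se.1))
  let acc1 := st.1 ++ ((wordsBetween.filter (fun w => w != "")).map (fun w => (w, "o")))
  let wordsWithin := PySem.Str.split₀ (PySem.Str.slice sentence (some se.1) (some (se.2 + 1)))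
  (acc1 ++ ((wordsWithin.filter (fun w => w != "")).map (fun w => (w, "s"))), se.2 + 1)

-- Invariant: running A's loop from (acc, ci) and appending the final 'o' tail
-- yields acc ++ B's recursion from ci.
theorem main_inv (sentence : String) (l : List (Int × Int))
    (acc : List (String × String)) (ci : Int) :
    (l.foldl (stepA sentence) (acc, ci)).1
      ++ (((PySem.Str.split₀ (PySem.Str.slice sentence (some (l.foldl (stepA sentence) (acc, ci)).2) none)).filter (fun w => w != "")).map (fun w => (w, "o")))
      = acc ++ annotateGo sentence l ci := by
  induction l generalizing acc ci with
  | nil => simp [annotateGo, filter_split₀]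
  | cons se rest ih =>
    obtain ⟨s, e⟩ := se
    simp only [List.foldl_cons]
    rw [show stepA sentence (acc, ci) (s, e)
        = (acc ++ ((PySem.Str.split₀ (PySem.Str.slice sentence (some ci) (some s))).filter (fun w => w != "")).map (fun w => (w, "o"))
              ++ ((PySem.Str.split₀ (PySem.Str.slice sentence (some s) (some (e + 1)))).filter (fun w => w != "")).map (fun w => (w, "s")), e + 1) from rfl]
    rw [ih]
    simp [annotateGo, filter_split₀]

-- ===== VERDICT (by name: the statement is the Claim_ definition above) =====
theorem annotate_sentence_spec : Claim_equal_annotate_sentence := by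
  intro sentence indices _
  unfold Spec_annotate_sentence annotate_sentence annotate_sentence_alt
  simp only []
  rw [show (fun (st : List (String × String) × Int) (se : Int × Int) =>
      let wordsBetween := PySem.Str.split₀ (PySem.Str.slice sentence (some st.2) (some se.1))
      let acc1 := st.1 ++ ((wordsBetween.filter (fun w => w != "")).map (fun w => (w, "o")))
      let wordsWithin := PySem.Str.split₀ (PySem.Str.slice sentence (some se.1) (some (se.2 + 1)))
      (acc1 ++ ((wordsWithin.filter (fun w => w != "")).map (fun w => (w, "s"))), se.2 + 1))
      = stepA sentence from rfl]
  simpa using main_inv sentence (PySem.List.sorted2 indices Prod.fst Prod.snd) [] 0
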